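-- pv_equiv track=rewrite | github.com/shanmukh-07/Owl-coder | Medium/Check if frequencies can be equal/check-if-frequencies-can-be-equal.py | sameFreq
-- ===== SOURCE A (Python) =====
-- def sameFreq(s):
--     d = {}
--     for i in s:
--         if i not in d:
--             d[i] = 1
--         else:
--             d[i] += 1
--     l = [i for i in d.values()]
--     if len(set(l)) ==  1:
--         return 1
--     i = 0
--     while i<len(l):
--         l[i] -= 1
--         if l[i] == 0:
--             if len(set(l)) == 2:
--                 return 1
--         if len(set(l)) == 1:
--             return 1
--         l[i] += 1
--         i += 1
--     return 0
-- ===== SOURCE B (Python) =====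
-- def sameFreq(s):
--     freq = {}
--     for c in s:
--         freq[c] = freq.get(c, 0) + 1
--     fof = {}
--     for v in freq.values():
--         fof[v] = fof.get(v, 0) + 1
--     vals = sorted(fof)
--     if len(vals) == 0:
--         return 0
--     if len(vals) == 1:
--         return 1
--     if len(vals) > 2:
--         return 0
--     a, b = vals
--     na, nb = fof[a], fof[b]
--     return 1 if (nb == 1 and b - 1 == a) or (na == 1 and a == 1) else 0
-- ===== Notes on version B (the rewrite author's own statement) =====
-- stated objective: alternative
-- what changed: B builds a frequency-of-frequencies table and decides the answer by a closed-form case split on its (at most two) distinct frequency values, instead of A's loop that decrements each frequency in turn and rescans the whole list as a set.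
import Mathlib
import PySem

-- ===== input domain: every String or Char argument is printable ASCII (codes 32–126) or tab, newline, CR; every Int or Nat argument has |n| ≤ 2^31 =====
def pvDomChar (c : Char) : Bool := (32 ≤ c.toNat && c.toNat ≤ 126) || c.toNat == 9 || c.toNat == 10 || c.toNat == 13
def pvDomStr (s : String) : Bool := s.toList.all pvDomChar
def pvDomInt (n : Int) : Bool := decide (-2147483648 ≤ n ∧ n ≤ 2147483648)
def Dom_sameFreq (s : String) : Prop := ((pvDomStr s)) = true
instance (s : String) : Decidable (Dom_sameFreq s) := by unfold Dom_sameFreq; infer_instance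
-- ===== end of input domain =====

-- B decides the answer from a counts-of-counts table in closed form instead of A's
-- per-index decrement-and-rescan loop (objective: alternative — a different algorithm).

-- ===== PORT A =====
-- A's 'while i < len(l)' loop: decrement l[i], test the two set-size conditions, restore, advance
def sameFreqLoop (l : List Int) (i : Nat) : Int :=
  if h : i < l.length then
    if (l.set i (l.getD i 0 - 1)).getD i 0 = 0 ∧ (PySem.Set.ofList (l.set i (l.getD i 0 - 1))).length = 2 then 1
    else if (PySem.Set.ofList (l.set i (l.getD i 0 - 1))).length = 1 then 1
    else sameFreqLoop l (i + 1)
  else 0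
termination_by l.length - i

def sameFreq (s : String) : Int :=
  let d : PySem.Dict Char Int :=
    s.toList.foldl (fun d c => if d.contains c = false then d.insert c 1 else d.modify c 0 (· + 1))
      PySem.Dict.empty
  let l : List Int := d.values
  if (PySem.Set.ofList l).length = 1 then 1
  else sameFreqLoop l 0

-- ===== PORT B =====
def sameFreq_alt (s : String) : Int :=
  let freq : PySem.Dict Char Int :=
    s.toList.foldl (fun d c => d.insert c (d.getD c 0 + 1)) PySem.Dict.empty
  let fof : PySem.Dict Int Int :=
    freq.values.foldl (fun d v => d.insert v (d.getD v 0 + 1)) PySem.Dict.empty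
  let vals : List Int := PySem.List.sorted fof.keys (fun x => x) false
  if vals.length = 0 then 0
  else if vals.length = 1 then 1
  else if 2 < vals.length then 0
  else
    let a := vals.getD 0 0
    let b := vals.getD 1 0
    if (fof.getD b 0 = 1 ∧ b - 1 = a) ∨ (fof.getD a 0 = 1 ∧ a = 1) then 1 else 0

-- ===== PRECONDITION & SPEC =====
def Spec_sameFreq (s : String) (out : Int) : Prop := out = sameFreq_alt s
instance (s : String) (out : Int) : Decidable (Spec_sameFreq s out) := by unfold Spec_sameFreq; infer_instance

-- ===== CLAIM (what is proved, stated in full; the proofs are below) =====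
def Claim_equal_sameFreq : Prop := ∀ (s : String), Dom_sameFreq s → Spec_sameFreq s (sameFreq s)

-- ===== LEMMAS AND PROOFS =====

-- the condition on which A's loop body returns 1 at index i
def loopCond (l : List Int) (i : Nat) : Prop :=
  ((l.set i (l.getD i 0 - 1)).getD i 0 = 0 ∧ (PySem.Set.ofList (l.set i (l.getD i 0 - 1))).length = 2)
  ∨ (PySem.Set.ofList (l.set i (l.getD i 0 - 1))).length = 1

lemma ofList_length_eq_card (l : List Int) : (PySem.Set.ofList l).length = l.toFinset.card := by
  have h1 : (PySem.Set.ofList l).toFinset = l.toFinset := by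
    ext x; simp [List.mem_toFinset, PySem.Set.mem_ofList]
  rw [← h1, List.toFinset_card_of_nodup (PySem.Set.nodup_ofList l)]

lemma loop_step_one (l : List Int) (j : Nat) (hjl : j < l.length) (hc : loopCond l j) :
    sameFreqLoop l j = 1 := by
  unfold sameFreqLoop
  rw [dif_pos hjl]
  rcases hc with h | h
  · rw [if_pos h]
  · by_cases h2 : (l.set j (l.getD j 0 - 1)).getD j 0 = 0 ∧ (PySem.Set.ofList (l.set j (l.getD j 0 - 1))).length = 2
    · rw [if_pos h2]
    · rw [if_neg h2, if_pos h]

lemma loop_eq_one (l : List Int) (j : Nat) (hjl : j < l.length) (hc : loopCond l j) :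
    ∀ i, i ≤ j → sameFreqLoop l i = 1 := by
  have H : ∀ n i, i ≤ j → j - i ≤ n → sameFreqLoop l i = 1 := by
    intro n
    induction n with
    | zero =>
      intro i hij h0
      have : i = j := by omega
      subst this
      exact loop_step_one l i hjl hc
    | succ n ih =>
      intro i hij hn
      by_cases hi : i = j
      · subst hi; exact loop_step_one l i hjl hc
      · have hil : i < l.length := by omega
        unfold sameFreqLoop
        rw [dif_pos hil]
        by_cases h1 : (l.set i (l.getD i 0 - 1)).getD i 0 = 0 ∧ (PySem.Set.ofList (l.set i (l.getD i 0 - 1))).length = 2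
        · rw [if_pos h1]
        · rw [if_neg h1]
          by_cases h2 : (PySem.Set.ofList (l.set i (l.getD i 0 - 1))).length = 1
          · rw [if_pos h2]
          · rw [if_neg h2]
            exact ih (i + 1) (by omega) (by omega)
  exact fun i hij => H (j - i) i hij (le_refl _)

lemma loop_eq_zero (l : List Int) (hnc : ∀ j, j < l.length → ¬ loopCond l j) :
    ∀ i, sameFreqLoop l i = 0 := by
  have H : ∀ n i, l.length - i ≤ n → sameFreqLoop l i = 0 := by
    intro n
    induction n with
    | zero =>
      intro i h0
      unfold sameFreqLoop
      rw [dif_neg (by omega)]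
    | succ n ih =>
      intro i hn
      by_cases hil : i < l.length
      · have hno := hnc i hil
        unfold sameFreqLoop
        rw [dif_pos hil, if_neg (fun hh => hno (Or.inl hh)), if_neg (fun hh => hno (Or.inr hh))]
        exact ih (i + 1) (by omega)
      · unfold sameFreqLoop
        rw [dif_neg hil]
  exact fun i => H (l.length - i) i (le_refl _)


lemma set_decomp (l : List Int) {j : Nat} (hj : j < l.length) (y : Int) :
    l.set j y = l.take j ++ y :: l.drop (j + 1) := by
  rw [List.set_eq_take_append_cons_drop, if_pos hj]

lemma decomp (l : List Int) {j : Nat} (hj : j < l.length) :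
    l = l.take j ++ l[j] :: l.drop (j + 1) := by
  conv_lhs => rw [← List.take_append_drop j l, ← List.getElem_cons_drop hj]

lemma count_split (l : List Int) {j : Nat} (hj : j < l.length) {w : Int} (hw : l[j] = w) :
    l.count w = (l.take j).count w + (l.drop (j + 1)).count w + 1 := by
  conv_lhs => rw [decomp l hj]
  rw [hw]
  simp [List.count_append]
  omega

lemma getD_set_self (l : List Int) {j : Nat} (hj : j < l.length) (y : Int) :
    (l.set j y).getD j 0 = y := by
  rw [List.getD_eq_getElem _ _ (by simpa using hj), List.getElem_set_self (by simpa using hj)]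

lemma mem_set_self (l : List Int) {j : Nat} (hj : j < l.length) (y : Int) :
    y ∈ l.set j y := by
  rw [set_decomp l hj]
  exact List.mem_append.2 (Or.inr (List.mem_cons_self))

lemma mem_set_of_ne {l : List Int} {j : Nat} {x y : Int} (hj : j < l.length)
    (hx : x ∈ l) (hne : x ≠ l[j]) : x ∈ l.set j y := by
  rw [set_decomp l hj]
  conv at hx => rw [decomp l hj]
  rcases List.mem_append.1 hx with h | h
  · exact List.mem_append.2 (Or.inl h)
  · rcases List.mem_cons.1 h with h | h
    · exact absurd h hne
    · exact List.mem_append.2 (Or.inr (List.mem_cons_of_mem _ h))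

lemma mem_set_of_two_le {l : List Int} {j : Nat} (hj : j < l.length) {y : Int}
    (hcnt : 2 ≤ l.count l[j]) : l[j] ∈ l.set j y := by
  have hs := count_split l hj rfl
  rw [set_decomp l hj]
  have : 0 < (l.take j).count l[j] ∨ 0 < (l.drop (j+1)).count l[j] := by omega
  rcases this with h | h
  · exact List.mem_append.2 (Or.inl (List.count_pos_iff.1 h))
  · exact List.mem_append.2 (Or.inr (List.mem_cons_of_mem _ (List.count_pos_iff.1 h)))

lemma mem_set_count_one {l : List Int} {j : Nat} (hj : j < l.length) {y x : Int}
    (hx : x ∈ l.set j y) (hcnt : l.count l[j] = 1) : x = y ∨ (x ∈ l ∧ x ≠ l[j]) := by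
  have hs := count_split l hj rfl
  rw [set_decomp l hj] at hx
  have htake : l[j] ∉ l.take j := by
    intro h; have := List.count_pos_iff.2 h; omega
  have hdrop : l[j] ∉ l.drop (j+1) := by
    intro h; have := List.count_pos_iff.2 h; omega
  rcases List.mem_append.1 hx with h | h
  · refine Or.inr ⟨List.take_subset _ _ h, fun he => htake (he ▸ h)⟩
  · rcases List.mem_cons.1 h with h | h
    · exact Or.inl h
    · refine Or.inr ⟨List.drop_subset _ _ h, fun he => hdrop (he ▸ h)⟩

lemma card_ge_two {l' : List Int} {x y : Int} (hx : x ∈ l') (hy : y ∈ l') (hxy : x ≠ y) :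
    2 ≤ l'.toFinset.card := by
  have hs : ({x, y} : Finset Int) ⊆ l'.toFinset := by
    intro z hz
    rcases Finset.mem_insert.1 hz with rfl | hz
    · exact List.mem_toFinset.2 hx
    · rw [Finset.mem_singleton] at hz; exact hz ▸ List.mem_toFinset.2 hy
  have : ({x, y} : Finset Int).card = 2 := by
    rw [Finset.card_insert_of_notMem (by simp [hxy]), Finset.card_singleton]
  exact this ▸ Finset.card_le_card hs

lemma card_ge_three {l' : List Int} {x y z : Int} (hx : x ∈ l') (hy : y ∈ l') (hz : z ∈ l')
    (hxy : x ≠ y) (hxz : x ≠ z) (hyz : y ≠ z) : 3 ≤ l'.toFinset.card := by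
  have hs : ({x, y, z} : Finset Int) ⊆ l'.toFinset := by
    intro w hw
    rcases Finset.mem_insert.1 hw with rfl | hw
    · exact List.mem_toFinset.2 hx
    · rcases Finset.mem_insert.1 hw with rfl | hw
      · exact List.mem_toFinset.2 hy
      · rw [Finset.mem_singleton] at hw; exact hw ▸ List.mem_toFinset.2 hz
  have : ({x, y, z} : Finset Int).card = 3 := by
    rw [Finset.card_insert_of_notMem (by simp [hxy, hxz]),
        Finset.card_insert_of_notMem (by simp [hyz]), Finset.card_singleton]
  exact this ▸ Finset.card_le_card hs

lemma main_abstract (l u : List Int) (hpos : ∀ x ∈ l, 1 ≤ x)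
    (hperm : u.Perm (PySem.Set.ofList l)) (hpair : u.Pairwise (· < ·)) :
    (if (PySem.Set.ofList l).length = 1 then (1 : Int) else sameFreqLoop l 0) =
    (if u.length = 0 then (0 : Int) else if u.length = 1 then 1 else if 2 < u.length then 0
     else if ((l.count (u.getD 1 0) : Int) = 1 ∧ u.getD 1 0 - 1 = u.getD 0 0)
          ∨ ((l.count (u.getD 0 0) : Int) = 1 ∧ u.getD 0 0 = 1) then 1 else 0) := by
  have hlen : (PySem.Set.ofList l).length = u.length := hperm.length_eq.symm
  have hmem : ∀ x : Int, x ∈ l ↔ x ∈ u := by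
    intro x
    rw [hperm.mem_iff, PySem.Set.mem_ofList]
  match u, hpair with
  | [], _ =>
    have hl : l = [] := by
      rw [List.eq_nil_iff_forall_not_mem]
      intro x hx
      exact absurd ((hmem x).1 hx) (List.not_mem_nil)
    subst hl
    simp only [List.length_nil, hlen]
    norm_num [loop_eq_zero [] (by simp) 0]
  | [a], _ =>
    simp only [hlen, List.length_singleton]
    norm_num
  | [a, b], hpair =>
    have hab : a < b := (List.pairwise_cons.1 hpair).1 b (by simp)
    have ha : a ∈ l := (hmem a).2 (by simp)
    have hb : b ∈ l := (hmem b).2 (by simp)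
    have h1a : 1 ≤ a := hpos a ha
    have hmem2 : ∀ x ∈ l, x = a ∨ x = b := by
      intro x hx
      simpa using (hmem x).1 hx
    simp only [hlen]
    norm_num
    by_cases hC : (l.count b = 1 ∧ b - 1 = a) ∨ (l.count a = 1 ∧ a = 1)
    · rw [if_pos hC]
      rcases hC with ⟨hc1', hba⟩ | ⟨hc1', ha1⟩
      · -- remove the single b, leaving all a
        obtain ⟨j, hj, hjb⟩ := List.mem_iff_getElem.1 hb
        apply loop_eq_one l j hj _ 0 (Nat.zero_le _)
        unfold loopCond
        right
        have hgd : l.getD j 0 = b := by rw [List.getD_eq_getElem _ _ hj, hjb]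
        rw [hgd, ofList_length_eq_card]
        have hfs : (l.set j (b - 1)).toFinset = {a} := by
          ext x
          simp only [List.mem_toFinset, Finset.mem_singleton]
          constructor
          · intro hx
            rcases mem_set_count_one hj hx (hjb ▸ hc1') with rfl | ⟨hxl, hxne⟩
            · omega
            · rcases hmem2 x hxl with rfl | rfl
              · rfl
              · exact absurd hjb.symm hxne
          · rintro rfl
            rw [← hba]
            exact mem_set_self l hj _
        rw [hfs, Finset.card_singleton]
      · -- remove the single a = 1, leaving {0, b}
        obtain ⟨j, hj, hja⟩ := List.mem_iff_getElem.1 ha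
        apply loop_eq_one l j hj _ 0 (Nat.zero_le _)
        unfold loopCond
        left
        have hgd : l.getD j 0 = a := by rw [List.getD_eq_getElem _ _ hj, hja]
        rw [hgd]
        constructor
        · rw [getD_set_self l hj]; omega
        · rw [ofList_length_eq_card]
          have hfs : (l.set j (a - 1)).toFinset = {0, b} := by
            ext x
            simp only [List.mem_toFinset, Finset.mem_insert, Finset.mem_singleton]
            constructor
            · intro hx
              rcases mem_set_count_one hj hx (hja ▸ hc1') with rfl | ⟨hxl, hxne⟩
              · left; omega
              · rcases hmem2 x hxl with rfl | rfl
                · exact absurd hja.symm hxne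
                · right; rfl
            · rintro (rfl | rfl)
              · rw [show (0:Int) = a - 1 by omega]
                exact mem_set_self l hj _
              · exact mem_set_of_ne hj hb (by omega)
          rw [hfs]
          rw [Finset.card_insert_of_notMem (by simp; omega), Finset.card_singleton]
    · rw [if_neg hC]
      push Not at hC
      apply loop_eq_zero
      intro j hj hcond
      unfold loopCond at hcond
      have hvl : l[j] ∈ l := List.getElem_mem _
      have hgd : l.getD j 0 = l[j] := List.getD_eq_getElem _ _ hj
      have hca : 1 ≤ l.count a := List.count_pos_iff.2 ha
      have hcb : 1 ≤ l.count b := List.count_pos_iff.2 hb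
      rcases hmem2 _ hvl with hva | hvb
      · -- l[j] = a
        have hbin : b ∈ l.set j (a - 1) := mem_set_of_ne hj hb (by omega)
        have hain : a - 1 ∈ l.set j (a - 1) := hva ▸ mem_set_self l hj _
        rw [hgd, hva] at hcond
        rcases hcond with ⟨hz, h2⟩ | h1
        · rw [getD_set_self l hj] at hz
          have ha1 : a = 1 := by omega
          have hcnta : l.count a ≠ 1 := fun h => hC.2 h ha1
          have hge2 : 2 ≤ l.count l[j] := by rw [hva]; omega
          have haain : a ∈ l.set j (a - 1) := hva ▸ mem_set_of_two_le hj hge2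
          rw [ofList_length_eq_card] at h2
          have h0in : (0:Int) ∈ l.set j (a - 1) := by
            rw [show (0:Int) = a - 1 by omega]
            exact mem_set_self l hj _
          have := card_ge_three h0in haain hbin (by omega) (by omega) (by omega)
          omega
        · rw [ofList_length_eq_card] at h1
          have := card_ge_two hain hbin (by omega)
          omega
      · -- l[j] = b
        have hain : a ∈ l.set j (b - 1) := mem_set_of_ne hj ha (by omega)
        have hbin : b - 1 ∈ l.set j (b - 1) := hvb ▸ mem_set_self l hj _
        rw [hgd, hvb] at hcond
        rcases hcond with ⟨hz, _⟩ | h1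
        · rw [getD_set_self l hj] at hz
          omega
        · rw [ofList_length_eq_card] at h1
          have hba : b - 1 = a := by
            by_contra hne
            have := card_ge_two hain hbin (fun h => hne h.symm)
            omega
          have hcntb : l.count b = 1 := by
            by_contra hne
            have hge2 : 2 ≤ l.count l[j] := by rw [hvb]; omega
            have hbbin : b ∈ l.set j (b - 1) := hvb ▸ mem_set_of_two_le hj hge2
            have := card_ge_two hain hbbin (by omega)
            omega
          exact hC.1 hcntb hba
  | a :: b :: c :: rest, hpair =>
    have hab : a < b := (List.pairwise_cons.1 hpair).1 b (by simp)
    have hac : a < c := (List.pairwise_cons.1 hpair).1 c (by simp)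
    have hbc : b < c := (List.pairwise_cons.1 (List.pairwise_cons.1 hpair).2).1 c (by simp)
    have ha : a ∈ l := (hmem a).2 (by simp)
    have hb : b ∈ l := (hmem b).2 (by simp)
    have hc : c ∈ l := (hmem c).2 (by simp)
    have hlen3 : 3 ≤ (a :: b :: c :: rest).length := by simp
    rw [if_neg (by omega : ¬ (PySem.Set.ofList l).length = 1),
        if_neg (by simp : ¬ (a :: b :: c :: rest).length = 0),
        if_neg (by omega), if_pos (by omega)]
    apply loop_eq_zero
    intro j hj hcond
    unfold loopCond at hcond
    have hvl : l[j] ∈ l := List.getElem_mem _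
    have hgd : l.getD j 0 = l[j] := List.getD_eq_getElem _ _ hj
    obtain ⟨w₁, w₂, hw1l, hw2l, h12, h1v, h2v⟩ :
        ∃ w₁ w₂ : Int, w₁ ∈ l ∧ w₂ ∈ l ∧ w₁ ≠ w₂ ∧ w₁ ≠ l[j] ∧ w₂ ≠ l[j] := by
      by_cases h1 : l[j] = a
      · exact ⟨b, c, hb, hc, by omega, by omega, by omega⟩
      · by_cases h2 : l[j] = b
        · exact ⟨a, c, ha, hc, by omega, by omega, by omega⟩
        · exact ⟨a, b, ha, hb, by omega, by omega, by omega⟩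
    have hw1 : w₁ ∈ l.set j (l[j] - 1) := mem_set_of_ne hj hw1l h1v
    have hw2 : w₂ ∈ l.set j (l[j] - 1) := mem_set_of_ne hj hw2l h2v
    rw [hgd] at hcond
    rcases hcond with ⟨hz, h2⟩ | h1
    · rw [getD_set_self l hj] at hz
      have h0 : l[j] - 1 = 0 := hz
      have h0in : (0:Int) ∈ l.set j (l[j] - 1) := by
        rw [show (0:Int) = l[j] - 1 from h0.symm]
        exact mem_set_self l hj _
      have hp1 : 1 ≤ w₁ := hpos _ hw1l
      have hp2 : 1 ≤ w₂ := hpos _ hw2l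
      rw [ofList_length_eq_card] at h2
      have := card_ge_three h0in hw1 hw2 (by omega) (by omega) h12
      omega
    · rw [ofList_length_eq_card] at h1
      have := card_ge_two hw1 hw2 h12
      omega

lemma values_counter_pos (cs : List Char) :
    ∀ x ∈ (PySem.Dict.counter cs).values, 1 ≤ x := by
  intro x hx
  have hv : (PySem.Dict.counter cs).values = (PySem.Set.ofList cs).map (fun k => (cs.count k : Int)) := by
    show (PySem.Dict.counter cs).items.map (·.2) = _
    rw [PySem.Dict.items_counter]
    simp
  rw [hv] at hx
  simp only [List.mem_map] at hx
  obtain ⟨k, hk, rfl⟩ := hx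
  have hkcs : k ∈ cs := (PySem.Set.mem_ofList _ _).1 hk
  have := List.count_pos_iff.2 hkcs
  omega

-- ===== VERDICT (by name: the statement is the Claim_ definition above) =====
theorem sameFreq_spec : Claim_equal_sameFreq := by
  intro s _
  unfold Spec_sameFreq sameFreq sameFreq_alt
  have hA : s.toList.foldl
      (fun d c => if d.contains c = false then d.insert c 1 else d.modify c 0 (· + 1))
      PySem.Dict.empty = PySem.Dict.counter s.toList := by
    rw [PySem.Dict.counter_eq_foldl]
    apply PySem.List.foldl_congr_mem
    intro d c _
    by_cases hc : d.contains c = true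
    · rw [if_neg (by simp [hc])]
    · have hc' : d.contains c = false := by simpa using hc
      rw [if_pos hc']
      simp [PySem.Dict.modify, PySem.Dict.getD_of_not_contains _ _ hc']
  simp only [hA, PySem.Dict.foldl_insert_getD_add_one_eq_counter, PySem.Dict.keys_counter,
    PySem.Dict.getD_counter]
  exact main_abstract _ _ (values_counter_pos s.toList) (PySem.List.sorted_perm _ _ _)
    (PySem.List.sorted_ofList_pairwise_lt _)
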